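-- pv_equiv track=rewrite | github.com/yaniv297/trackflow | backend/services/suggestions_service.py | _format_step_list
-- ===== SOURCE A (Python) =====
-- from typing import List, Dict, Any, Optional, Tuple, Union
--
-- def _format_step_list(steps: List[str]) -> Optional[str]:
--     if not steps:
--         return None
--     formatted = []
--     for step in steps:
--         text = (step or "").replace("_", " ").title()
--         formatted.append(text)
--     display = formatted[:2]
--     extra = len(formatted) - len(display)
--     if not display:
--         return None
--     if extra == 0:
--         if len(display) == 1:
--             return display[0]
--         return " and ".join(display)
--     if len(display) == 1:
--         return f"{display[0]} and {extra} more"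
--     return f"{', '.join(display)} and {extra} more"
-- ===== SOURCE B (Python) =====
-- from typing import List, Optional
--
-- def _format_step_list(steps: List[str]) -> Optional[str]:
--     def fmt(s):
--         return (s or "").replace("_", " ").title()
--     match steps:
--         case []:
--             return None
--         case [a]:
--             return fmt(a)
--         case [a, b]:
--             return f"{fmt(a)} and {fmt(b)}"
--         case [a, b, *rest]:
--             return f"{fmt(a)}, {fmt(b)} and {len(rest)} more"
-- ===== Notes on version B (the rewrite author's own statement) =====
-- stated objective: simpler
-- what changed: Replaces A's format-all-steps loop, slicing, extra-counting and four-way length branching with a direct structural pattern match on the list shape ([], [a], [a,b], [a,b,*rest]) that builds each final sentence in one expression and never constructs intermediate lists or joins.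
import Mathlib
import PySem

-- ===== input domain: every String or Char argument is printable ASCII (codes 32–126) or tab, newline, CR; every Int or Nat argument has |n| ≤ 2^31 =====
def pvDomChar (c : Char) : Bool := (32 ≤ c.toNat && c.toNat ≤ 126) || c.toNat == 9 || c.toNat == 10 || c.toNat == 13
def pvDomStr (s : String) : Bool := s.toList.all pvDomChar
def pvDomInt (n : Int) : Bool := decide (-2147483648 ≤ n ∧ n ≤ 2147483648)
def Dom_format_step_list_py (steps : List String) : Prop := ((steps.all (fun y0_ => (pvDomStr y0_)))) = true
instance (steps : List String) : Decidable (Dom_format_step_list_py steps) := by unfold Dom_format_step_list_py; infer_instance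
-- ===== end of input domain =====

-- B replaces A's format-all-steps loop, slice, extra count and four-way branching by a direct
-- structural pattern match on the list shape ([], [a], [a,b], [a,b,*rest]) that assembles each
-- final sentence in one expression; it formats only the first two steps.

-- ===== PORT A =====
-- str.title() ported by hand (PySem has no title); exact on ASCII, where a character is
-- cased iff it is a letter: a letter is uppercased after a non-letter, lowercased otherwise.
def pvTitle : List Char → Bool → List Char
  | [], _ => []
  | c :: cs, prev =>
    (if c.isAlpha then (if prev then c.toLower else c.toUpper) else c) :: pvTitle cs c.isAlpha

-- (step or "").replace("_", " ").title(); on a str argument `step or ""` is `step` itself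
-- when nonempty, and on "" the whole expression returns "" either way, so it is a no-op here.
def pvFmt (s : String) : String :=
  String.ofList (pvTitle (PySem.Str.replace s "_" " ").toList false)

def format_step_list_py (steps : List String) : Option String :=
  if steps = [] then none
  else
    let formatted := steps.foldl (fun acc step => acc ++ [pvFmt step]) []
    let display := PySem.List.slice formatted none (some 2)
    let extra : Int := (formatted.length : Int) - (display.length : Int)
    if display = [] then none
    else if extra = 0 then
      (if display.length = 1 then some display[0]! else some (PySem.Str.join " and " display))
    else if display.length = 1 then
      some (display[0]! ++ " and " ++ PySem.Int.toStr extra ++ " more")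
    else
      some (PySem.Str.join ", " display ++ " and " ++ PySem.Int.toStr extra ++ " more")

-- ===== PORT B =====
def format_step_list_py_alt (steps : List String) : Option String :=
  match steps with
  | [] => none
  | [a] => some (pvFmt a)
  | [a, b] => some (pvFmt a ++ " and " ++ pvFmt b)
  | a :: b :: rest => some (pvFmt a ++ ", " ++ pvFmt b ++ " and " ++ PySem.Int.toStr (rest.length : Int) ++ " more")

-- ===== PRECONDITION & SPEC =====
def Spec_format_step_list_py (steps : List String) (out : Option String) : Prop := out = format_step_list_py_alt steps
instance (steps : List String) (out : Option String) : Decidable (Spec_format_step_list_py steps out) := by unfold Spec_format_step_list_py; infer_instance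

-- ===== CLAIM (what is proved, stated in full; the proofs are below) =====
def Claim_equal_format_step_list_py : Prop := ∀ (steps : List String), Dom_format_step_list_py steps → Spec_format_step_list_py steps (format_step_list_py steps)

-- ===== LEMMAS AND PROOFS =====
theorem pvFoldlSnoc (steps : List String) (acc : List String) :
    steps.foldl (fun acc step => acc ++ [pvFmt step]) acc = acc ++ steps.map pvFmt := by
  induction steps generalizing acc with
  | nil => simp
  | cons s t ih => simp [List.foldl, ih]

theorem pvJoinPair (sep x y : String) : PySem.Str.join sep [x, y] = x ++ sep ++ y := by
  apply String.ext
  simp [PySem.Str.toList_join, PySem.Chars.join, String.toList_append,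
    List.intercalate, List.intersperse]

theorem format_step_list_py_spec' (steps : List String) :
    format_step_list_py steps = format_step_list_py_alt steps := by
  match steps with
  | [] => rfl
  | [a] =>
    simp [format_step_list_py, format_step_list_py_alt,
      PySem.List.slice, PySem.List.clampIdx]
  | [a, b] =>
    simp [format_step_list_py, format_step_list_py_alt,
      PySem.List.slice, PySem.List.clampIdx, pvJoinPair]
  | a :: b :: c :: r =>
    have hf := pvFoldlSnoc (a :: b :: c :: r) []
    simp only [format_step_list_py, format_step_list_py_alt, hf]
    have h2 : (((r.length : Int) + 1 + 1 + 1) - 2) = ((r.length : Int) + 1) := by omega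
    have h3 : ¬((r.length : Int) + 1 = 0) := by omega
    simp [PySem.List.slice, PySem.List.clampIdx, pvJoinPair, String.append_assoc, h2, h3]

-- ===== VERDICT (by name: the statement is the Claim_ definition above) =====
theorem format_step_list_py_spec : Claim_equal_format_step_list_py := by
  intro steps _
  exact format_step_list_py_spec' steps
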